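-- pv_equiv track=rewrite | github.com/UJHa/Codeit-Study | 프로그래머스/(01) 2021 KAKAO BLIND RECRUITMENT/03)순위 검색/jinhwan.py | get_data_count
-- ===== SOURCE A (Python) =====
-- def get_data_count(data_list, q_score):
--     result = 0
--     data_list.sort(key=lambda x: x[1], reverse=True)
--
--     for d in data_list:
--         d_score = d[1]
--         if q_score <= d_score:
--             result += 1
--         else:
--             break
--
--     return result
-- ===== SOURCE B (Python) =====
-- def get_data_count(data_list, q_score):
--     # Single linear pass: count entries whose score (index 1) is >= q_score.
--     # Note: unlike A, this does not sort data_list in place.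
--     result = 0
--     for d in data_list:
--         if q_score <= d[1]:
--             result += 1
--     return result
-- ===== Notes on version B (the rewrite author's own statement) =====
-- stated objective: simpler
-- what changed: B counts entries with d[1] >= q_score in one linear pass with no sorting and no in-place mutation, instead of sorting descending by score and counting the satisfying prefix until the first break.
import Mathlib
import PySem

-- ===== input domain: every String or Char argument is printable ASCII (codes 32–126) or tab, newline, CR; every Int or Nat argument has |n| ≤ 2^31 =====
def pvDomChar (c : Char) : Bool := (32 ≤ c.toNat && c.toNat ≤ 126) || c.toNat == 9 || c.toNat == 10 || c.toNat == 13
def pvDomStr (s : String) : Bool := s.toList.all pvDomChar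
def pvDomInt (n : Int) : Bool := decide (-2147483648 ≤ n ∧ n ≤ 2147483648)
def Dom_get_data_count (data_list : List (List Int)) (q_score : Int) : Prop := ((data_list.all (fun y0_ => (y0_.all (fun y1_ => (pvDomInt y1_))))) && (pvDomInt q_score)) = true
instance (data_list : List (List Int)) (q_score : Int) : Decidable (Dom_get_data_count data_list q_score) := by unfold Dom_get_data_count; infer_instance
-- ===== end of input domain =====

-- B replaces A's sort-descending-then-count-prefix with one linear pass counting d[1] >= q_score
-- (return value only: A sorts data_list in place, B does not mutate it).

-- ===== PORT A =====
-- d[1] under Pre_ (every inner list has length ≥ 2) is always in range; getD 0 is never hit on Pre_.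
def pvKey (d : List Int) : Int := (PySem.List.pyGet? d 1).getD 0

-- the for-loop with break: count the prefix satisfying q_score ≤ d[1]
def pvLoopA (q_score : Int) : List (List Int) → Int
  | [] => 0
  | d :: rest => if q_score ≤ pvKey d then 1 + pvLoopA q_score rest else 0

def get_data_count (data_list : List (List Int)) (q_score : Int) : Int :=
  pvLoopA q_score (PySem.List.sorted data_list pvKey true)

-- ===== PORT B =====
def get_data_count_alt (data_list : List (List Int)) (q_score : Int) : Int :=
  data_list.foldl (fun result d => if q_score ≤ pvKey d then result + 1 else result) 0

-- ===== PRECONDITION & SPEC =====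
-- A raises IndexError (in the sort key or the loop) when some inner list has fewer than 2 elements.
def Pre_get_data_count (data_list : List (List Int)) (q_score : Int) : Prop :=
  ∀ d ∈ data_list, 2 ≤ d.length
instance (data_list : List (List Int)) (q_score : Int) : Decidable (Pre_get_data_count data_list q_score) := by unfold Pre_get_data_count; infer_instance
def pvWitness_get_data_count : List (List Int) × Int := ([[1, 5], [2, 3], [3, 7]], 4)

def Spec_get_data_count (data_list : List (List Int)) (q_score : Int) (out : Int) : Prop := out = get_data_count_alt data_list q_score
instance (data_list : List (List Int)) (q_score : Int) (out : Int) : Decidable (Spec_get_data_count data_list q_score out) := by unfold Spec_get_data_count; infer_instance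

-- ===== CLAIM =====
def Claim_equal_get_data_count : Prop := ∀ (data_list : List (List Int)) (q_score : Int), Dom_get_data_count data_list q_score → Pre_get_data_count data_list q_score → Spec_get_data_count data_list q_score (get_data_count data_list q_score)

-- ===== LEMMAS AND PROOFS =====

-- On a list pairwise-descending in pvKey, the break-loop counts all satisfying elements.
theorem pvLoopA_eq_countP (q : Int) (l : List (List Int))
    (h : l.Pairwise (fun a b => pvKey b ≤ pvKey a)) :
    pvLoopA q l = (l.countP (fun d => decide (q ≤ pvKey d)) : Int) := by
  induction l with
  | nil => simp [pvLoopA]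
  | cons d rest ih =>
    rcases List.pairwise_cons.mp h with ⟨hd, hrest⟩
    by_cases hq : q ≤ pvKey d
    · simp [pvLoopA, hq, ih hrest]
      omega
    · have hz : rest.countP (fun d => decide (q ≤ pvKey d)) = 0 := by
        rw [List.countP_eq_zero]
        intro b hb
        have := hd b hb
        simp only [decide_eq_true_eq]
        omega
      simp [pvLoopA, hq, hz]

theorem alt_eq_countP (q : Int) (l : List (List Int)) :
    get_data_count_alt l q = (l.countP (fun d => decide (q ≤ pvKey d)) : Int) := by
  unfold get_data_count_alt
  suffices h : ∀ (acc : Int), l.foldl (fun result d => if q ≤ pvKey d then result + 1 else result) acc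
      = acc + (l.countP (fun d => decide (q ≤ pvKey d)) : Int) by
    simpa using h 0
  induction l with
  | nil => simp
  | cons d rest ih =>
    intro acc
    by_cases hq : q ≤ pvKey d <;>
      simp [List.foldl_cons, hq, ih]; omega

-- ===== VERDICT =====
theorem get_data_count_spec : Claim_equal_get_data_count := by
  intro data_list q_score _ _
  unfold Spec_get_data_count get_data_count
  rw [pvLoopA_eq_countP q_score _ (PySem.List.sorted_pairwise_rev data_list pvKey),
      alt_eq_countP]
  congr 1
  exact_mod_cast (PySem.List.sorted_perm data_list pvKey true).countP_eq _
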